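-- pv_equiv track=rewrite | github.com/Jaeyeop-Jung/CodingTest | 프로그래머스/Lv3/1회차/Lv3. 최고의 집합.py | solution
-- ===== SOURCE A (Python) =====
-- def solution(n, s):
--     if s < n:
--         return [-1]
--     if s % n == 0:
--         return [s // n] * n
--     else:
--         arr = [s // n] * n
--         diff = s - sum(arr)
--         idx = 0
--         while 0 < diff:
--             arr[idx] += 1
--             diff -= 1
--             idx += 1
--             idx %= n
--         return sorted(arr)
-- ===== SOURCE B (Python) =====
-- def solution(n, s):
--     if s < n:
--         return [-1]
--     q, r = divmod(s, n)
--     return [q] * (n - r) + [q + 1] * r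
-- ===== Notes on version B (the rewrite author's own statement) =====
-- stated objective: faster
-- what changed: replaces the increment-one-unit-at-a-time while loop plus final sort with the closed form [s//n]*(n-s%n)+[s//n+1]*(s%n), which is already sorted
-- outside the precondition, e.g. on solution(0, 5): A raises ZeroDivisionError, B raises ZeroDivisionError; on solution(-2, 3): A raises IndexError, B returns []
import Mathlib
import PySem

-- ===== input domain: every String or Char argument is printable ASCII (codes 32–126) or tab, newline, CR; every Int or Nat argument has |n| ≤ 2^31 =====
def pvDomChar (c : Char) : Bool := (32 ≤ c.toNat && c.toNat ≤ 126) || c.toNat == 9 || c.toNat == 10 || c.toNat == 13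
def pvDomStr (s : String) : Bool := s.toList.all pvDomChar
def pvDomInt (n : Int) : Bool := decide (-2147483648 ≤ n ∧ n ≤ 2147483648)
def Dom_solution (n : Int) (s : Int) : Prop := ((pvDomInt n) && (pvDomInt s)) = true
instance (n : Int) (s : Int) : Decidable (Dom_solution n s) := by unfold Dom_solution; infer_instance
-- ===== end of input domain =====

-- B replaces A's one-unit-at-a-time distribution loop + final sort by the closed form
-- [q]*(n-r) + [q+1]*r (q = s//n, r = s%n), which is produced already sorted.

-- ===== PORT A =====
-- the while loop: state (arr, diff, idx); arr[idx] += 1 is ported as set/getD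
-- (exact on every input the loop is reached with inside Pre_, where 0 ≤ idx < len(arr))
def solLoopA (arr : List Int) (diff : Int) (idx : Int) (n : Int) : List Int :=
  if 0 < diff then
    solLoopA (arr.set idx.toNat (arr.getD idx.toNat 0 + 1)) (diff - 1)
      (PySem.Int.mod (idx + 1) n) n
  else arr
termination_by diff.toNat
decreasing_by omega

def solution (n : Int) (s : Int) : List Int :=
  if s < n then [-1]
  else if PySem.Int.mod s n = 0 then
    PySem.List.pyRepeat [PySem.Int.floordiv s n] n
  else
    let arr := PySem.List.pyRepeat [PySem.Int.floordiv s n] n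
    let diff := s - arr.sum
    PySem.List.sorted (solLoopA arr diff 0 n) (fun x => x)

-- ===== PORT B =====
def solution_alt (n : Int) (s : Int) : List Int :=
  if s < n then [-1]
  else
    let q := PySem.Int.floordiv s n
    let r := PySem.Int.mod s n
    PySem.List.pyRepeat [q] (n - r) ++ PySem.List.pyRepeat [q + 1] r

-- ===== PRECONDITION & SPEC =====
-- Pre_ excludes exactly the inputs where A raises: n = 0 with 0 ≤ s (ZeroDivisionError at s % n),
-- and n < 0 with 0 < s and s % n ≠ 0 (IndexError: the loop indexes into an empty list).
def Pre_solution (n : Int) (s : Int) : Prop :=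
  ¬(n = 0 ∧ 0 ≤ s) ∧ ¬(n < 0 ∧ 0 < s ∧ PySem.Int.mod s n ≠ 0)
instance (n : Int) (s : Int) : Decidable (Pre_solution n s) := by
  unfold Pre_solution; infer_instance

def pvWitness_solution : Int × Int := (3, 7)

def Spec_solution (n : Int) (s : Int) (out : List Int) : Prop := out = solution_alt n s
instance (n : Int) (s : Int) (out : List Int) : Decidable (Spec_solution n s out) := by
  unfold Spec_solution; infer_instance

-- ===== CLAIM (what is proved, stated in full; the proofs are below) =====
def Claim_equal_solution : Prop :=
  ∀ (n : Int) (s : Int), Dom_solution n s → Pre_solution n s → Spec_solution n s (solution n s)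

-- ===== LEMMAS AND PROOFS =====

lemma solLoopA_of_nonpos (arr : List Int) (diff idx n : Int) (h : diff ≤ 0) :
    solLoopA arr diff idx n = arr := by
  rw [solLoopA, if_neg (by omega)]

-- the loop on arr = [q+1]*k ++ [q]*(m-k) with diff = d increments slots k..k+d-1
lemma solLoopA_invariant (q : Int) (m : Nat) (d : Nat) :
    ∀ k : Nat, k + d ≤ m →
      solLoopA (List.replicate k (q + 1) ++ List.replicate (m - k) q) (d : Int)
        (k : Int) (m : Int)
      = List.replicate (k + d) (q + 1) ++ List.replicate (m - (k + d)) q := by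
  induction d with
  | zero =>
      intro k hk
      rw [solLoopA]
      simp
  | succ d ih =>
      intro k hk
      rw [solLoopA]
      have hklt : k < m := by omega
      have hset :
          (List.replicate k (q + 1) ++ List.replicate (m - k) q).set
              ((k : Int)).toNat
              ((List.replicate k (q + 1) ++ List.replicate (m - k) q).getD ((k : Int)).toNat 0 + 1)
          = List.replicate (k + 1) (q + 1) ++ List.replicate (m - (k + 1)) q := by
        have hmk : m - k = (m - k - 1) + 1 := by omega
        rw [hmk]
        simp only [Int.toNat_natCast, List.replicate_succ]
        rw [List.getD_eq_getElem?_getD]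
        rw [List.getElem?_append_right (by simp)]
        simp only [List.length_replicate, Nat.sub_self, List.getElem?_cons_zero,
          Option.getD_some, List.set_append, List.length_replicate, Nat.lt_irrefl,
          if_false, List.set_cons_zero]
        rw [show m - (k + 1) = m - k - 1 from by omega]
        rw [← List.singleton_append, ← List.append_assoc, ← List.replicate_succ',
          List.replicate_succ, List.cons_append]
      rw [if_pos (by omega : (0:Int) < (↑(d + 1) : Int))]
      have hd1 : ((d + 1 : Nat) : Int) - 1 = (d : Int) := by push_cast; ring
      rw [hset, hd1]
      by_cases hd0 : d = 0
      · subst hd0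
        rw [solLoopA_of_nonpos _ _ _ _ (by omega)]
      · have hk1 : (k : Int) + 1 = ((k + 1 : Nat) : Int) := by push_cast; ring
        have hmod : PySem.Int.mod ((k : Int) + 1) (m : Int) = ((k + 1 : Nat) : Int) := by
          rw [PySem.Int.mod_eq_emod_of_pos (by omega : (0:Int) < (m : Int))]
          rw [hk1, Int.emod_eq_of_lt (by positivity) (by exact_mod_cast (by omega : k + 1 < m))]
        rw [hmod, ih (k + 1) (by omega)]
        congr 1 <;> congr 1 <;> omega

-- the sorted rearrangement of [q+1]*r ++ [q]*(m-r) is [q]*(m-r) ++ [q+1]*r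
lemma sorted_repl (q : Int) (r m : Nat) :
    PySem.List.sorted (List.replicate r (q + 1) ++ List.replicate (m - r) q) (fun x => x)
    = List.replicate (m - r) q ++ List.replicate r (q + 1) := by
  apply PySem.List.sorted_id_eq_of_perm_of_pairwise
  · exact List.perm_append_comm
  · apply List.pairwise_append.2
    refine ⟨List.pairwise_replicate.2 (Or.inr (by omega)),
            List.pairwise_replicate.2 (Or.inr (by omega)), ?_⟩
    intro a ha b hb
    rw [List.eq_of_mem_replicate ha, List.eq_of_mem_replicate hb]
    omega

-- ===== VERDICT (by name: the statement is the Claim_ definition above) =====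
theorem solution_spec : Claim_equal_solution := by
  unfold Claim_equal_solution
  intro n s _ hpre
  obtain ⟨h0, hneg⟩ := hpre
  unfold Spec_solution solution solution_alt
  by_cases hlt : s < n
  · simp [hlt]
  · rw [if_neg hlt, if_neg hlt]
    rcases lt_trichotomy n 0 with hn | hn | hn
    · -- n < 0 : both sides are []
      have hrepn : PySem.List.pyRepeat [PySem.Int.floordiv s n] n = [] := by
        rw [PySem.List.pyRepeat_singleton]
        simp [Int.toNat_of_nonpos (le_of_lt hn)]
      have hr := PySem.Int.mod_neg_bounds (a := s) hn
      by_cases hm : PySem.Int.mod s n = 0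
      · rw [if_pos hm]
        show PySem.List.pyRepeat [PySem.Int.floordiv s n] n
           = PySem.List.pyRepeat [PySem.Int.floordiv s n] (n - PySem.Int.mod s n)
             ++ PySem.List.pyRepeat [PySem.Int.floordiv s n + 1] (PySem.Int.mod s n)
        rw [hrepn, hm]
        simp [PySem.List.pyRepeat_singleton]
        omega
      · rw [if_neg hm]
        show PySem.List.sorted
            (solLoopA (PySem.List.pyRepeat [PySem.Int.floordiv s n] n)
              (s - (PySem.List.pyRepeat [PySem.Int.floordiv s n] n).sum) 0 n) (fun x => x)
           = PySem.List.pyRepeat [PySem.Int.floordiv s n] (n - PySem.Int.mod s n)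
             ++ PySem.List.pyRepeat [PySem.Int.floordiv s n + 1] (PySem.Int.mod s n)
        have hs0 : s ≤ 0 := by
          by_contra h; exact hneg ⟨hn, by omega, hm⟩
        rw [hrepn, solLoopA_of_nonpos _ _ _ _ (by simp; omega)]
        have h1 : (n - PySem.Int.mod s n).toNat = 0 := by omega
        have h2 : (PySem.Int.mod s n).toNat = 0 := by omega
        simp [PySem.List.pyRepeat_singleton, h1, h2, PySem.List.sorted]
    · exact absurd ⟨hn, by omega⟩ h0
    · -- n > 0
      obtain ⟨m, hm, hm0⟩ : ∃ m : Nat, (m : Int) = n ∧ 0 < m :=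
        ⟨n.toNat, Int.toNat_of_nonneg (le_of_lt hn), by omega⟩
      have hq := PySem.Int.floordiv_mul_add_mod s n
      have hr0 : 0 ≤ PySem.Int.mod s n := PySem.Int.mod_nonneg (a := s) hn
      have hrn : PySem.Int.mod s n < n := PySem.Int.mod_lt (a := s) hn
      have hrep : PySem.List.pyRepeat [PySem.Int.floordiv s n] n
          = List.replicate m (PySem.Int.floordiv s n) := by
        rw [PySem.List.pyRepeat_singleton]; congr 1; omega
      by_cases hmod : PySem.Int.mod s n = 0
      · rw [if_pos hmod]
        show PySem.List.pyRepeat [PySem.Int.floordiv s n] n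
           = PySem.List.pyRepeat [PySem.Int.floordiv s n] (n - PySem.Int.mod s n)
             ++ PySem.List.pyRepeat [PySem.Int.floordiv s n + 1] (PySem.Int.mod s n)
        rw [hmod]
        simp [PySem.List.pyRepeat_singleton]
      · rw [if_neg hmod]
        show PySem.List.sorted
            (solLoopA (PySem.List.pyRepeat [PySem.Int.floordiv s n] n)
              (s - (PySem.List.pyRepeat [PySem.Int.floordiv s n] n).sum) 0 n) (fun x => x)
           = PySem.List.pyRepeat [PySem.Int.floordiv s n] (n - PySem.Int.mod s n)
             ++ PySem.List.pyRepeat [PySem.Int.floordiv s n + 1] (PySem.Int.mod s n)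
        have hsum : (List.replicate m (PySem.Int.floordiv s n)).sum
            = (m : Int) * PySem.Int.floordiv s n := by
          simp [List.sum_replicate]
        have hdiff : s - (List.replicate m (PySem.Int.floordiv s n)).sum
            = (((PySem.Int.mod s n).toNat : Int)) := by
          rw [hsum, hm, Int.toNat_of_nonneg hr0]
          have h := mul_comm n (PySem.Int.floordiv s n)
          omega
        rw [hrep, hdiff]
        have hinv := solLoopA_invariant (PySem.Int.floordiv s n) m (PySem.Int.mod s n).toNat
          0 (by omega)
        simp only [Nat.cast_zero, Nat.zero_add, Nat.sub_zero, List.replicate_zero,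
          List.nil_append, Nat.zero_add] at hinv
        rw [hm] at hinv
        rw [hinv, sorted_repl]
        rw [PySem.List.pyRepeat_singleton, PySem.List.pyRepeat_singleton]
        rw [show m - (PySem.Int.mod s n).toNat = (n - PySem.Int.mod s n).toNat from by omega]
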